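-- pv_equiv track=rewrite | github.com/dmtAndIvanson/dmtAnd_YandexAlgorithmTraining | t10/Ya4/H/H.py | count_similar
-- ===== SOURCE A (Python) =====
-- def count_similar(word, seq):
--     """Find how often word is met in sequence."""
--     ltr_dict = {}
--
--     # Count how many times letter is met in word.
--     for ltr in word:
--         if ltr not in ltr_dict:
--             ltr_dict[ltr] = 0
--         ltr_dict[ltr] += 1
--
--     # Make dictionary for words in letter with 0 count.
--     empty_dict = {}
--
--     for ltr in ltr_dict:
--         empty_dict[ltr] = 0
--
--     # Check every letter in word.
--     w_ctr = 0
--     len_str = 0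
--     start = 0
--     ptr = 0
--
--     tmp_dict = empty_dict.copy()
--     while ptr < len(seq):
--         # If letter is not in word, go ahead.
--         if seq[ptr] not in ltr_dict:
--             ptr += 1
--             start = ptr
--             tmp_dict = empty_dict.copy()
--             len_str = 0
--             continue
--
--         # If letter is in word, count it.
--         tmp_dict[seq[ptr]] += 1
--         len_str += 1
--
--
--         # If letter is met more, than should be, upadate data.
--         if tmp_dict[seq[ptr]] > ltr_dict[seq[ptr]]:
--             # Update where start is, and remove some data.
--             while seq[start] != seq[ptr]:
--                 len_str -= 1
--                 tmp_dict[seq[start]] -= 1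
--                 start += 1
--             len_str -= 1
--             tmp_dict[seq[start]] -= 1
--             start += 1
--
--         # When each letter in sequence matches with word, update data.
--         if len_str == len(word):
--             w_ctr += 1
--             tmp_dict[seq[start]] -= 1
--             start += 1
--             len_str -= 1
--
--         ptr += 1
--
--     return w_ctr
-- ===== SOURCE B (Python) =====
-- def count_similar(word, seq):
--     """Find how often word is met in sequence."""
--     if not word:
--         return 0
--     m = len(word)
--     target = sorted(word)
--     return sum(1 for i in range(len(seq) - m + 1) if sorted(seq[i:i+m]) == target)
-- ===== Notes on version B (the rewrite author's own statement) =====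
-- stated objective: simpler
-- what changed: Replaced A's one-pass sliding-window with letter-count dicts and a shrink-from-the-left inner loop by a direct scan that, for each starting index, compares sorted(window) against sorted(word) (with an explicit 0 for the empty word).
import Mathlib
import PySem

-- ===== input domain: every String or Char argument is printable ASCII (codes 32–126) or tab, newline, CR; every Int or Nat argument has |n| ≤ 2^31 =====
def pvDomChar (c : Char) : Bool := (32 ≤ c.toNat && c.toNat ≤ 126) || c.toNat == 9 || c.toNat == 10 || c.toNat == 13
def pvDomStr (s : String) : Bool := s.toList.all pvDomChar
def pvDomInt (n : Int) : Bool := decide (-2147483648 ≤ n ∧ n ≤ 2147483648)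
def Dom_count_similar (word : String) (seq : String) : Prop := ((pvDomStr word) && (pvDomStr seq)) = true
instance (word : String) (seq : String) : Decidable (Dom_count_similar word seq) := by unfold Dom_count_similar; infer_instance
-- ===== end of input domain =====

-- B replaces A's sliding window over letter-count dicts by a direct per-start-index comparison of
-- sorted(window) with sorted(word) (simpler; not faster). Equivalence is proved for the return value.

-- ===== PORT A =====
-- first for-loop of A: count how many times each letter is met in word
def pvCountA (w : List Char) : PySem.Dict Char Int :=
  w.foldl (fun d c => (if d.contains c then d else d.insert c 0).modify c 0 (· + 1))
    PySem.Dict.empty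

-- second for-loop of A: same keys, every count 0
def pvZeroA (ltr : PySem.Dict Char Int) : PySem.Dict Char Int :=
  ltr.keys.foldl (fun d k => d.insert k 0) PySem.Dict.empty

-- inner `while seq[start] != seq[ptr]` loop; fuel bounds the iterations (at every call site the
-- loop stops at an index < l.length, so the fuel-0 / out-of-range answers are never reached --
-- in Python they would be IndexError)
def pvInnerA (l : List Char) (c : Char) :
    Nat → PySem.Dict Char Int × Int × Nat → PySem.Dict Char Int × Int × Nat
  | 0, st => st
  | fuel+1, (tmp, len_str, start) =>
    match PySem.List.pyGet? l (start : Int) with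
    | none => (tmp, len_str, start)
    | some a =>
      if a = c then (tmp, len_str, start)
      else pvInnerA l c fuel (tmp.modify a 0 (· - 1), len_str - 1, start + 1)

-- main `while ptr < len(seq)` loop of A; fuel = l.length - ptr, so fuel 0 / pyGet? = none is
-- exactly the exit of the while loop. The `.getD c` defaults are never used: those indices are
-- in range whenever Python does not raise.
def pvLoopA (l : List Char) (ltr zero : PySem.Dict Char Int) (m : Int) :
    Nat → Nat → Nat → PySem.Dict Char Int → Int → Int → Int
  | 0, _, _, _, _, w_ctr => w_ctr
  | fuel+1, start, ptr, tmp, len_str, w_ctr =>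
    match PySem.List.pyGet? l (ptr : Int) with
    | none => w_ctr
    | some c =>
      if ltr.contains c then
        let tmp1 := tmp.modify c 0 (· + 1)
        let len1 := len_str + 1
        match
          (if tmp1.getD c 0 > ltr.getD c 0 then
            match pvInnerA l c l.length (tmp1, len1, start) with
            | (t, ln, s) =>
              (t.modify ((PySem.List.pyGet? l (s : Int)).getD c) 0 (· - 1), ln - 1, s + 1)
          else (tmp1, len1, start)) with
        | (tmp2, len2, start2) =>
          if len2 = m then
            pvLoopA l ltr zero m fuel (start2+1) (ptr+1)
              (tmp2.modify ((PySem.List.pyGet? l (start2 : Int)).getD c) 0 (· - 1))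
              (len2 - 1) (w_ctr + 1)
          else
            pvLoopA l ltr zero m fuel start2 (ptr+1) tmp2 len2 w_ctr
      else
        pvLoopA l ltr zero m fuel (ptr+1) (ptr+1) zero 0 w_ctr

def count_similar (word : String) (seq : String) : Int :=
  let ltr := pvCountA word.toList
  let zero := pvZeroA ltr
  pvLoopA seq.toList ltr zero (word.toList.length : Int) seq.toList.length 0 0 zero 0 0

-- ===== PORT B =====
def count_similar_alt (word : String) (seq : String) : Int :=
  let w := word.toList
  let l := seq.toList
  if w = [] then 0
  else
    let m : Int := w.length
    let target := PySem.List.sorted w (fun x => x)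
    ((PySem.List.pyRange 0 ((l.length : Int) - m + 1)).map
      (fun i =>
        if PySem.List.sorted (PySem.List.slice l (some i) (some (i + m))) (fun x => x) = target
        then (1 : Int) else 0)).sum

-- ===== PRECONDITION & SPEC =====
def Spec_count_similar (word : String) (seq : String) (out : Int) : Prop := out = count_similar_alt word seq
instance (word : String) (seq : String) (out : Int) : Decidable (Spec_count_similar word seq out) := by unfold Spec_count_similar; infer_instance

-- ===== CLAIM (what is proved, stated in full; the proofs are below) =====
def Claim_equal_count_similar : Prop := ∀ (word : String) (seq : String), Dom_count_similar word seq → Spec_count_similar word seq (count_similar word seq)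

-- ===== LEMMAS AND PROOFS =====

-- the window l[s:p]
def pvWin (l : List Char) (s p : Nat) : List Char := (l.drop s).take (p - s)

-- number of anagram windows starting at an index ≥ s
def pvS (l w : List Char) (s : Nat) : Int :=
  ((List.range' s (l.length + 1 - w.length - s)).countP
    (fun j => ((l.drop j).take w.length).isPerm w) : Nat)

-- loop invariant of A's main loop
def pvInv (l w : List Char) (s p : Nat) (tmp : PySem.Dict Char Int) : Prop :=
  s ≤ p ∧ p ≤ l.length ∧ p - s < w.length ∧
  (∀ v, tmp.contains v = w.contains v) ∧
  (∀ v, tmp.getD v 0 = ((pvWin l s p).count v : Int)) ∧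
  (∀ v ∈ pvWin l s p, v ∈ w) ∧
  (∀ v, (pvWin l s p).count v ≤ w.count v)

lemma countA_getD (w : List Char) : ∀ (d : PySem.Dict Char Int) (v : Char),
    (w.foldl (fun d c => (if d.contains c then d else d.insert c 0).modify c 0 (· + 1)) d).getD v 0
      = d.getD v 0 + (w.count v : Int) := by
  induction w with
  | nil => intro d v; simp
  | cons c t ih =>
    intro d v
    simp only [List.foldl_cons, ih, List.count_cons]
    have hbase : (if d.contains c then d else d.insert c 0).getD c 0 = d.getD c 0 := by
      by_cases hdc : d.contains c = true
      · rw [if_pos hdc]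
      · simp only [Bool.not_eq_true] at hdc
        rw [if_neg (by simp [hdc]), PySem.Dict.getD_insert,
          PySem.Dict.getD_of_not_contains _ _ hdc]
        simp
    have hne : ∀ v', v' ≠ c → (if d.contains c then d else d.insert c 0).getD v' 0 = d.getD v' 0 := by
      intro v' hv'
      by_cases hdc : d.contains c = true
      · rw [if_pos hdc]
      · rw [if_neg (by simp [hdc]), PySem.Dict.getD_insert, if_neg hv']
    rw [PySem.Dict.getD_modify]
    by_cases hvc : v = c
    · rw [if_pos hvc, hbase, hvc]
      simp only [beq_self_eq_true]
      push_cast; ring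
    · rw [if_neg hvc, hne v hvc]
      have : (c == v) = false := by simp [Ne.symm hvc]
      simp [this]

lemma countA_contains (w : List Char) : ∀ (d : PySem.Dict Char Int) (v : Char),
    (w.foldl (fun d c => (if d.contains c then d else d.insert c 0).modify c 0 (· + 1)) d).contains v
      = (w.contains v || d.contains v) := by
  induction w with
  | nil => intro d v; simp
  | cons c t ih =>
    intro d v
    simp only [List.foldl_cons, ih, PySem.Dict.contains_modify, List.contains_cons]
    by_cases hvc : v = c
    · subst hvc; simp
    · have h1 : (v == c) = false := by simp [hvc]
      have h2 : (c == v) = false := by simp [Ne.symm hvc]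
      have h3 : (if d.contains c then d else d.insert c 0).contains v = d.contains v := by
        by_cases hdc : d.contains c = true
        · rw [if_pos hdc]
        · rw [if_neg (by simp [hdc]), PySem.Dict.contains_insert]
          simp [h1]
      simp [h1, h3]

lemma pvCountA_getD (w : List Char) (v : Char) : (pvCountA w).getD v 0 = (w.count v : Int) := by
  unfold pvCountA
  rw [countA_getD]
  simp

lemma pvCountA_contains (w : List Char) (v : Char) : (pvCountA w).contains v = w.contains v := by
  unfold pvCountA
  rw [countA_contains]
  simp

lemma pvZeroA_getD' (ks : List Char) : ∀ (d : PySem.Dict Char Int),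
    (∀ v, d.getD v 0 = 0) → ∀ v, (ks.foldl (fun d k => d.insert k 0) d).getD v 0 = 0 := by
  induction ks with
  | nil => intro d h v; exact h v
  | cons k t ih =>
    intro d h v
    refine ih _ (fun v' => ?_) v
    rw [PySem.Dict.getD_insert]
    by_cases hv : v' = k <;> simp [hv, h]

lemma pvZeroA_getD (ltr : PySem.Dict Char Int) (v : Char) : (pvZeroA ltr).getD v 0 = 0 := by
  unfold pvZeroA
  exact pvZeroA_getD' _ _ (fun v' => by simp) v

lemma pvZeroA_contains' (ks : List Char) : ∀ (d : PySem.Dict Char Int) (v : Char),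
    (ks.foldl (fun d k => d.insert k 0) d).contains v = (ks.contains v || d.contains v) := by
  induction ks with
  | nil => intro d v; simp
  | cons k t ih =>
    intro d v
    simp only [List.foldl_cons, ih, PySem.Dict.contains_insert, List.contains_cons]
    by_cases hv : v = k
    · subst hv; simp
    · have h1 : (v == k) = false := by simp [hv]
      have h2 : (k == v) = false := by simp [Ne.symm hv]
      simp [h1]

lemma pvZeroA_contains (ltr : PySem.Dict Char Int) (v : Char) :
    (pvZeroA ltr).contains v = ltr.contains v := by
  unfold pvZeroA
  rw [pvZeroA_contains']
  simp [PySem.Dict.contains_eq_decide_mem_keys]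

lemma decs_getD (seg : List Char) : ∀ (d : PySem.Dict Char Int) (v : Char),
    (seg.foldl (fun d a => d.modify a 0 (· - 1)) d).getD v 0 = d.getD v 0 - (seg.count v : Int) := by
  induction seg with
  | nil => intro d v; simp
  | cons a t ih =>
    intro d v
    simp only [List.foldl_cons, ih, List.count_cons, PySem.Dict.getD_modify]
    by_cases hv : v = a
    · subst hv; simp; ring
    · have h2 : (a == v) = false := by simp [Ne.symm hv]
      simp [hv, h2]

lemma decs_contains (seg : List Char) : ∀ (d : PySem.Dict Char Int) (v : Char),
    (∀ a ∈ seg, d.contains a = true) →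
    (seg.foldl (fun d a => d.modify a 0 (· - 1)) d).contains v = d.contains v := by
  induction seg with
  | nil => intro d v _; rfl
  | cons a t ih =>
    intro d v hall
    have hda : d.contains a = true := hall a (by simp)
    have hstep : ∀ x, (d.modify a 0 (· - 1)).contains x = (x == a || d.contains x) :=
      fun x => PySem.Dict.contains_modify d a x 0 _
    simp only [List.foldl_cons]
    rw [ih _ v (fun b hb => by
      rw [hstep b, hall b (by simp [hb])]
      simp), hstep v]
    by_cases hv : v = a
    · subst hv; simp [hda]
    · simp [hv]

lemma window_split (l : List Char) (j s k : Nat) (h1 : j ≤ s) (h2 : s ≤ k) :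
    (l.drop j).take (k - j) = (l.drop j).take (s - j) ++ (l.drop s).take (k - s) := by
  have hk : k - j = (s - j) + (k - s) := by omega
  rw [hk, List.take_add, List.drop_drop]
  have : j + (s - j) = s := by omega
  rw [this]

lemma window_snoc (l : List Char) (s p : Nat) (hs : s ≤ p) (hp : p < l.length) :
    (l.drop s).take (p + 1 - s) = (l.drop s).take (p - s) ++ [l[p]] := by
  rw [window_split l s p (p+1) hs (by omega)]
  congr 1
  have h1 : p + 1 - p = 1 := by omega
  rw [h1]
  rw [List.drop_eq_getElem_cons hp]
  rfl

lemma perm_of_count_le_of_length {xs ys : List Char}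
    (h : ∀ c, xs.count c ≤ ys.count c) (hl : xs.length = ys.length) : xs.Perm ys := by
  have hsub : xs.Subperm ys := List.subperm_ext_iff.mpr (fun x _ => h x)
  exact hsub.perm_of_length_le (le_of_eq hl.symm)

lemma pvS_stop (l w : List Char) (s : Nat) (h : l.length + 1 - w.length ≤ s) : pvS l w s = 0 := by
  unfold pvS
  have h0 : l.length + 1 - w.length - s = 0 := by omega
  rw [h0]
  simp

lemma pvS_succ (l w : List Char) (s : Nat) (h : s < l.length + 1 - w.length) :
    pvS l w s = (if ((l.drop s).take w.length).isPerm w then 1 else 0) + pvS l w (s+1) := by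
  unfold pvS
  have h0 : l.length + 1 - w.length - s = (l.length + 1 - w.length - (s+1)) + 1 := by omega
  rw [h0, List.range'_succ, List.countP_cons]
  by_cases hp : ((l.drop s).take w.length).isPerm w = true <;> simp [hp] <;> push_cast <;> ring

lemma pvS_skip (l w : List Char) (s s' : Nat) (h : s ≤ s')
    (hnm : ∀ j, s ≤ j → j < s' → j + w.length ≤ l.length → ¬ ((l.drop j).take w.length).Perm w) :
    pvS l w s = pvS l w s' := by
  obtain ⟨n, rfl⟩ : ∃ n, s' = s + n := ⟨s' - s, by omega⟩
  clear h
  induction n generalizing s with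
  | zero => rfl
  | succ n ih =>
    have step : pvS l w s = pvS l w (s+1) := by
      by_cases hs : s < l.length + 1 - w.length
      · rw [pvS_succ l w s hs]
        have hnp : ¬ ((l.drop s).take w.length).Perm w :=
          hnm s le_rfl (by omega) (by omega)
        have : ((l.drop s).take w.length).isPerm w = false := by
          rw [Bool.eq_false_iff]
          intro hc
          exact hnp (List.isPerm_iff.mp hc)
        simp [this]
      · rw [pvS_stop l w s (by omega), pvS_stop l w (s+1) (by omega)]
    rw [step]
    have : s + (n+1) = (s+1) + n := by omega
    rw [this]
    exact ih (s+1) (fun j h1 h2 h3 => hnm j (by omega) (by omega) h3)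

lemma innerA_spec (l : List Char) (c : Char) :
    ∀ (fuel start : Nat) (tmp : PySem.Dict Char Int) (len_str : Int) (j : Nat),
      start ≤ j → l[j]? = some c → (∀ i, start ≤ i → i < j → l[i]? ≠ some c) →
      j - start < fuel →
      pvInnerA l c fuel (tmp, len_str, start) =
        (((l.drop start).take (j - start)).foldl (fun d a => d.modify a 0 (· - 1)) tmp,
         len_str - ((j : Int) - start), j) := by
  intro fuel
  induction fuel with
  | zero => intro start tmp len_str j h1 h2 h3 h4; omega
  | succ fuel ih =>
    intro start tmp len_str j h1 h2 h3 h4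
    have hjl : j < l.length := by
      by_contra hc
      rw [List.getElem?_eq_none (by omega)] at h2
      simp at h2
    have hsl : start < l.length := by omega
    have hget : PySem.List.pyGet? l (start : Int) = some l[start] := by
      rw [PySem.List.pyGet?_natCast, List.getElem?_eq_getElem hsl]
    show pvInnerA l c (fuel+1) (tmp, len_str, start) = _
    rw [pvInnerA, hget]
    dsimp only
    by_cases hsj : start = j
    · subst hsj
      have hc : l[start] = c := by
        rw [List.getElem?_eq_getElem hsl] at h2
        exact Option.some.inj h2
      simp [hc]
    · have hlt : start < j := by omega
      have hne : l[start] ≠ c := by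
        intro hc
        exact h3 start le_rfl hlt (by rw [List.getElem?_eq_getElem hsl, hc])
      rw [if_neg hne]
      rw [ih (start+1) (tmp.modify l[start] 0 (· - 1)) (len_str - 1) j (by omega) h2
        (fun i hi1 hi2 => h3 i (by omega) hi2) (by omega)]
      have hseg : (l.drop start).take (j - start)
          = l[start] :: (l.drop (start+1)).take (j - (start+1)) := by
        rw [List.drop_eq_getElem_cons hsl]
        have : j - start = (j - (start+1)) + 1 := by omega
        rw [this, List.take_succ_cons]
      rw [hseg, List.foldl_cons]
      refine Prod.ext rfl (Prod.ext ?_ rfl)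
      show len_str - 1 - ((j : Int) - (start+1)) = len_str - ((j : Int) - start)
      push_cast
      ring

lemma loopA_empty (l : List Char) (zero : PySem.Dict Char Int) (m : Int) :
    ∀ (fuel start ptr : Nat) (tmp : PySem.Dict Char Int) (len_str w_ctr : Int),
      pvLoopA l (pvCountA []) zero m fuel start ptr tmp len_str w_ctr = w_ctr := by
  intro fuel
  induction fuel with
  | zero => intros; rfl
  | succ fuel ih =>
    intro start ptr tmp len_str w_ctr
    rw [pvLoopA]
    cases h : PySem.List.pyGet? l (ptr : Int) with
    | none => rfl
    | some c =>
      dsimp only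
      have hc : (pvCountA []).contains c = false := by
        rw [pvCountA_contains]; rfl
      rw [hc]
      simp only [Bool.false_eq_true, if_false]
      exact ih (ptr+1) (ptr+1) zero 0 w_ctr


lemma pvWin_cons (l : List Char) (s p : Nat) (h1 : s < p) (h2 : s < l.length) :
    pvWin l s p = l[s] :: pvWin l (s+1) p := by
  unfold pvWin
  rw [List.drop_eq_getElem_cons h2]
  have : p - s = (p - (s+1)) + 1 := by omega
  rw [this, List.take_succ_cons]

lemma pvWin_append (l : List Char) (j s k : Nat) (h1 : j ≤ s) (h2 : s ≤ k) :
    pvWin l j k = pvWin l j s ++ pvWin l s k :=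
  window_split l j s k h1 h2

lemma mem_pvWin_of_index (l : List Char) (s p i : Nat) (h1 : s ≤ i) (h2 : i < p)
    (h3 : i < l.length) : l[i] ∈ pvWin l s p := by
  unfold pvWin
  have hlen : i - s < ((l.drop s).take (p - s)).length := by
    simp [List.length_take, List.length_drop]
    omega
  have : ((l.drop s).take (p - s))[i - s] = l[i] := by
    rw [List.getElem_take, List.getElem_drop]
    congr 1
    omega
  rw [← this]
  exact List.getElem_mem hlen

lemma pvWin_index_of_mem (l : List Char) (s p : Nat) (v : Char) (h : v ∈ pvWin l s p) :
    ∃ i, s ≤ i ∧ i < p ∧ i < l.length ∧ l[i]? = some v := by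
  unfold pvWin at h
  obtain ⟨i, hi, hEq⟩ := List.getElem_of_mem h
  have hi' : i < p - s ∧ i < l.length - s := by
    have := hi
    simp [List.length_take, List.length_drop] at this
    omega
  refine ⟨s + i, by omega, by omega, by omega, ?_⟩
  rw [List.getElem?_eq_getElem (by omega)]
  rw [List.getElem_take, List.getElem_drop] at hEq
  rw [hEq]

lemma modify_contains_inv (d : PySem.Dict Char Int) (w : List Char) (k : Char) (f : Int → Int)
    (h : ∀ v, d.contains v = w.contains v) (hk : k ∈ w) :
    ∀ v, (d.modify k 0 f).contains v = w.contains v := by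
  intro v
  rw [PySem.Dict.contains_modify, h]
  by_cases hv : v = k
  · subst hv
    simp [hk]
  · simp [hv]

lemma loopA_main (l w : List Char) (hw : w ≠ []) :
    ∀ (fuel : Nat), ∀ (s p : Nat) (tmp : PySem.Dict Char Int) (w_ctr : Int),
      fuel = l.length - p → pvInv l w s p tmp →
      pvLoopA l (pvCountA w) (pvZeroA (pvCountA w)) (w.length : Int) fuel s p tmp
          ((p : Int) - (s : Int)) w_ctr
        = w_ctr + pvS l w s := by
  intro fuel
  induction fuel with
  | zero =>
    intro s p tmp w_ctr hfuel hinv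
    obtain ⟨hsp, hpl, hlen, -, -, -, -⟩ := hinv
    rw [pvS_stop l w s (by omega)]
    show w_ctr = w_ctr + 0
    ring
  | succ fuel ih =>
    intro s p tmp w_ctr hfuel hinv
    obtain ⟨hsp, hpl, hlen, hcont, hval, hmem, hle⟩ := hinv
    have hwpos : 0 < w.length := List.length_pos_iff.mpr hw
    have hp : p < l.length := by omega
    have hget : PySem.List.pyGet? l (p : Int) = some l[p] := by
      rw [PySem.List.pyGet?_natCast, List.getElem?_eq_getElem hp]
    rw [pvLoopA, hget]
    dsimp only
    rw [pvCountA_contains]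
    by_cases hcw : l[p] ∈ w
    case neg =>
      -- character not in word: the window restarts after p
      have hcf : w.contains l[p] = false := by
        rw [Bool.eq_false_iff]
        intro hc
        exact hcw (by simpa using hc)
      rw [hcf]
      simp only [Bool.false_eq_true, if_false]
      have hinv' : pvInv l w (p+1) (p+1) (pvZeroA (pvCountA w)) := by
        refine ⟨le_rfl, by omega, by simpa using hwpos, ?_, ?_, ?_, ?_⟩
        · intro v; rw [pvZeroA_contains, pvCountA_contains]
        · intro v; rw [pvZeroA_getD]; simp [pvWin]
        · intro v hv; simp [pvWin] at hv
        · intro v; simp [pvWin]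
      have h := ih (p+1) (p+1) (pvZeroA (pvCountA w)) w_ctr (by omega) hinv'
      norm_num at h
      rw [h]
      congr 1
      refine (pvS_skip l w s (p+1) (by omega) ?_).symm
      intro j hj1 hj2 hj3 hperm
      have hmemp : l[p] ∈ pvWin l j (j + w.length) :=
        mem_pvWin_of_index l j (j + w.length) p (by omega) (by omega) hp
      have hwin : pvWin l j (j + w.length) = (l.drop j).take w.length := by
        unfold pvWin; congr 1; omega
      rw [hwin] at hmemp
      exact hcw (hperm.mem_iff.mp hmemp)
    case pos =>
      have hct : w.contains l[p] = true := by simpa using hcw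
      rw [hct]
      simp only [if_true]
      have hsnoc : pvWin l s (p+1) = pvWin l s p ++ [l[p]] := by
        unfold pvWin; exact window_snoc l s p hsp hp
      have hcnt1 : (pvWin l s (p+1)).count l[p] = (pvWin l s p).count l[p] + 1 := by
        rw [hsnoc, List.count_append]
        simp [List.count_cons]
      have hcntv : ∀ v, v ≠ l[p] → (pvWin l s (p+1)).count v = (pvWin l s p).count v := by
        intro v hv
        rw [hsnoc, List.count_append]
        simp [List.count_cons, hv, Ne.symm hv]
      have hcntw1 : ∀ v, (tmp.modify l[p] 0 (· + 1)).getD v 0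
          = ((pvWin l s (p+1)).count v : Int) := by
        intro v
        rw [PySem.Dict.getD_modify]
        by_cases hv : v = l[p]
        · subst hv; rw [if_pos rfl, hval, hcnt1]; push_cast; ring
        · rw [if_neg hv, hval, hcntv v hv]
      have hcont1 : ∀ v, (tmp.modify l[p] 0 (· + 1)).contains v = w.contains v :=
        modify_contains_inv tmp w l[p] _ hcont hcw
      have hmem1 : ∀ v ∈ pvWin l s (p+1), v ∈ w := by
        intro v hv
        rw [hsnoc] at hv
        rcases List.mem_append.mp hv with h | h
        · exact hmem v h
        · simp at h; subst h; exact hcw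
      by_cases hover : (pvWin l s p).count l[p] = w.count l[p]
      case neg =>
        -- no overflow: the window simply grows by one
        have hlt : (pvWin l s p).count l[p] < w.count l[p] := lt_of_le_of_ne (hle l[p]) hover
        rw [if_neg (show ¬ ((tmp.modify l[p] 0 (· + 1)).getD l[p] 0 > (pvCountA w).getD l[p] 0) by
          rw [hcntw1 l[p], pvCountA_getD, hcnt1]; push_cast; omega)]
        try dsimp only
        have hle1 : ∀ v, (pvWin l s (p+1)).count v ≤ w.count v := by
          intro v
          by_cases hv : v = l[p]
          · subst hv; rw [hcnt1]; omega
          · rw [hcntv v hv]; exact hle v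
        by_cases hm : p + 1 - s = w.length
        case pos =>
          -- the window is a full anagram: count it and drop its first character
          rw [if_pos (show (p:Int) - s + 1 = (w.length : Int) by push_cast; omega)]
          have hsl : s < l.length := by omega
          have hgs : (PySem.List.pyGet? l (s:Int)).getD l[p] = l[s] := by
            rw [PySem.List.pyGet?_natCast, List.getElem?_eq_getElem hsl]
            rfl
          rw [hgs]
          have hconsW : pvWin l s (p+1) = l[s] :: pvWin l (s+1) (p+1) :=
            pvWin_cons l s (p+1) (by omega) hsl
          have hsmem : l[s] ∈ w := hmem1 l[s] (by rw [hconsW]; exact List.mem_cons_self)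
          have hcnt2 : ∀ v, (pvWin l (s+1) (p+1)).count v
              = (pvWin l s (p+1)).count v - (if v = l[s] then 1 else 0) := by
            intro v
            rw [hconsW, List.count_cons]
            by_cases hv : v = l[s]
            · simp [hv]
            · simp [hv, Ne.symm hv]
          have hinv3 : pvInv l w (s+1) (p+1)
              ((tmp.modify l[p] 0 (· + 1)).modify l[s] 0 (· - 1)) := by
            refine ⟨by omega, by omega, by omega, ?_, ?_, ?_, ?_⟩
            · exact modify_contains_inv _ w l[s] _ hcont1 hsmem
            · intro v
              rw [PySem.Dict.getD_modify]
              by_cases hv : v = l[s]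
              · subst hv
                rw [if_pos rfl, hcntw1, hcnt2]
                have : 0 < (pvWin l s (p+1)).count l[s] := by
                  rw [hconsW]; simp [List.count_cons]
                simp only [if_pos rfl]
                simp
                push_cast
                omega
              · rw [if_neg hv, hcntw1, hcnt2]
                simp [hv]
            · intro v hv
              refine hmem1 v ?_
              rw [hconsW]
              exact List.mem_cons_of_mem _ hv
            · intro v
              rw [hcnt2 v]
              have hv1 := hle1 v
              by_cases hv : v = l[s]
              · subst hv; simp; omega
              · simp [hv]; omega
          have harg : (p:Int) - s + 1 - 1 = ((p+1 : Nat) : Int) - ((s+1 : Nat) : Int) := by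
            push_cast; ring
          rw [harg, ih (s+1) (p+1) _ (w_ctr+1) (by omega) hinv3]
          have hperm : ((l.drop s).take w.length).Perm w := by
            have hwin : (l.drop s).take w.length = pvWin l s (p+1) := by
              unfold pvWin; congr 1; omega
            rw [hwin]
            refine perm_of_count_le_of_length hle1 ?_
            have : (pvWin l s (p+1)).length = p + 1 - s := by
              unfold pvWin
              simp [List.length_take, List.length_drop]
              omega
            rw [this, hm]
          rw [pvS_succ l w s (by omega), if_pos (List.isPerm_iff.mpr hperm)]
          ring
        case neg =>
          -- window not yet full: just advance ptr
          rw [if_neg (show ¬ ((p:Int) - s + 1 = (w.length : Int)) by push_cast; omega)]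
          have hinv2 : pvInv l w s (p+1) (tmp.modify l[p] 0 (· + 1)) :=
            ⟨by omega, by omega, by omega, hcont1, hcntw1, hmem1, hle1⟩
          have harg : (p:Int) - s + 1 = ((p+1 : Nat) : Int) - (s : Int) := by push_cast; ring
          rw [harg, ih s (p+1) _ w_ctr (by omega) hinv2]
      case pos =>
        -- overflow: shrink the window past the first occurrence of l[p]
        have hcpos : 0 < w.count l[p] := List.count_pos_iff.mpr hcw
        have hcmem : l[p] ∈ pvWin l s p := List.count_pos_iff.mp (by omega)
        obtain ⟨i0, hi0s, hi0p, hi0l, hi0v⟩ := pvWin_index_of_mem l s p l[p] hcmem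
        have hex : ∃ j, s ≤ j ∧ l[j]? = some l[p] := ⟨i0, hi0s, hi0v⟩
        obtain ⟨hjs, hjv⟩ := Nat.find_spec hex
        set j := Nat.find hex with hjdef
        have hjmin : ∀ i, s ≤ i → i < j → l[i]? ≠ some l[p] :=
          fun i h1 h2 hc' => Nat.find_min hex h2 ⟨h1, hc'⟩
        have hjp : j < p := by
          have : j ≤ i0 := Nat.find_min' hex ⟨hi0s, hi0v⟩
          omega
        have hjl : j < l.length := by omega
        have hjval : l[j] = l[p] := by
          rw [List.getElem?_eq_getElem hjl] at hjv
          exact Option.some.inj hjv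
        rw [if_pos (show (tmp.modify l[p] 0 (· + 1)).getD l[p] 0 > (pvCountA w).getD l[p] 0 by
          rw [hcntw1 l[p], pvCountA_getD, hcnt1, hover]; push_cast; omega)]
        rw [innerA_spec l l[p] l.length s (tmp.modify l[p] 0 (· + 1)) ((p:Int) - s + 1) j hjs hjv
          hjmin (by omega)]
        try dsimp only
        have hgj : (PySem.List.pyGet? l (j:Int)).getD l[p] = l[p] := by
          rw [PySem.List.pyGet?_natCast, List.getElem?_eq_getElem hjl]
          simpa using hjval
        rw [hgj]
        rw [if_neg (show ¬ ((p:Int) - s + 1 - ((j:Int) - s) - 1 = (w.length : Int)) by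
          push_cast; omega)]
        -- the decremented prefix is pvWin l s j and contains no l[p]
        have hsegc : (pvWin l s j).count l[p] = 0 := by
          rw [List.count_eq_zero]
          intro hmem'
          obtain ⟨i, h1, h2, h3, h4⟩ := pvWin_index_of_mem l s j l[p] hmem'
          exact hjmin i h1 h2 h4
        have hsplit1 : ∀ v, (pvWin l s (p+1)).count v
            = (pvWin l s j).count v + (pvWin l j (p+1)).count v := by
          intro v
          rw [pvWin_append l s j (p+1) hjs (by omega), List.count_append]
        have hconsJ : pvWin l j (p+1) = l[p] :: pvWin l (j+1) (p+1) := by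
          have := pvWin_cons l j (p+1) (by omega) hjl
          rwa [hjval] at this
        have hcntJ : ∀ v, (pvWin l j (p+1)).count v
            = (pvWin l (j+1) (p+1)).count v + (if v = l[p] then 1 else 0) := by
          intro v
          rw [hconsJ, List.count_cons]
          by_cases hv : v = l[p]
          · simp [hv]
          · simp [hv, Ne.symm hv]
        have hsegmem : ∀ a ∈ pvWin l s j, (tmp.modify l[p] 0 (· + 1)).contains a = true := by
          intro a ha
          rw [hcont1]
          have : a ∈ pvWin l s (p+1) := by
            rw [pvWin_append l s j (p+1) hjs (by omega)]
            exact List.mem_append.mpr (Or.inl ha)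
          simpa using hmem1 a this
        have hT : ∀ v, ((pvWin l s j).foldl (fun d a => d.modify a 0 (· - 1))
            (tmp.modify l[p] 0 (· + 1))).getD v 0 = ((pvWin l j (p+1)).count v : Int) := by
          intro v
          rw [decs_getD, hcntw1, hsplit1]
          push_cast
          ring
        have hTc : ∀ v, ((pvWin l s j).foldl (fun d a => d.modify a 0 (· - 1))
            (tmp.modify l[p] 0 (· + 1))).contains v = w.contains v := by
          intro v
          rw [decs_contains _ _ _ hsegmem, hcont1]
        have hcj1 : (pvWin l (j+1) (p+1)).count l[p] = w.count l[p] := by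
          have h1 := hsplit1 l[p]
          have h2 := hcntJ l[p]
          rw [hsegc] at h1
          simp at h2
          omega
        have hinv4 : pvInv l w (j+1) (p+1)
            (((pvWin l s j).foldl (fun d a => d.modify a 0 (· - 1))
              (tmp.modify l[p] 0 (· + 1))).modify l[p] 0 (· - 1)) := by
          refine ⟨by omega, by omega, by omega, ?_, ?_, ?_, ?_⟩
          · exact modify_contains_inv _ w l[p] _ hTc hcw
          · intro v
            rw [PySem.Dict.getD_modify]
            by_cases hv : v = l[p]
            · subst hv
              rw [if_pos rfl, hT, hcntJ]
              simp
            · rw [if_neg hv, hT, hcntJ]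
              simp [hv]
          · intro v hv
            refine hmem1 v ?_
            rw [pvWin_append l s j (p+1) hjs (by omega), hconsJ]
            exact List.mem_append.mpr (Or.inr (List.mem_cons_of_mem _ hv))
          · intro v
            by_cases hv : v = l[p]
            · subst hv; rw [hcj1]
            · have h1 := hsplit1 v
              have h2 := hcntJ v
              have h3 := hle v
              have h4 := hcntv v hv
              simp only [if_neg hv] at h2
              omega
        have harg : (p:Int) - s + 1 - ((j:Int) - s) - 1
            = ((p+1 : Nat) : Int) - ((j+1 : Nat) : Int) := by push_cast; ring
        rw [show List.take (j - s) (List.drop s l) = pvWin l s j from rfl]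
        rw [harg, ih (j+1) (p+1) _ w_ctr (by omega) hinv4]
        congr 1
        refine (pvS_skip l w s (j+1) (by omega) ?_).symm
        intro j' h1 h2 h3 hperm
        -- any window starting at j' ≤ j contains the segment [j, p+1) and hence too many l[p]
        have hwin' : (l.drop j').take w.length = pvWin l j' (j' + w.length) := by
          unfold pvWin; congr 1; omega
        rw [hwin'] at hperm
        have hd1 : (pvWin l j' (j' + w.length)).count l[p]
            = (pvWin l j' j).count l[p] + (pvWin l j (j' + w.length)).count l[p] := by
          rw [pvWin_append l j' j (j' + w.length) (by omega) (by omega), List.count_append]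
        have hd2 : (pvWin l j (j' + w.length)).count l[p]
            = (pvWin l j (p+1)).count l[p] + (pvWin l (p+1) (j' + w.length)).count l[p] := by
          rw [pvWin_append l j (p+1) (j' + w.length) (by omega) (by omega), List.count_append]
        have hdJ : (pvWin l j (p+1)).count l[p] = w.count l[p] + 1 := by
          have := hcntJ l[p]
          simp at this
          omega
        have := hperm.count_eq l[p]
        omega



lemma alt_eq_pvS (word seq : String) (hw : word.toList ≠ []) :
    count_similar_alt word seq = pvS seq.toList word.toList 0 := by
  unfold count_similar_alt
  rw [if_neg hw]
  show (List.map
      (fun i => if PySem.List.sorted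
          (PySem.List.slice seq.toList (some i) (some (i + (word.toList.length : Int))))
          (fun x => x) = PySem.List.sorted word.toList (fun x => x) then (1:Int) else 0)
      (PySem.List.pyRange 0 ((seq.toList.length : Int) - (word.toList.length : Int) + 1))).sum
    = pvS seq.toList word.toList 0
  rw [PySem.List.pyRange_one, List.map_map]
  have hfun : ∀ (k : Nat),
      ((fun i => if PySem.List.sorted
            (PySem.List.slice seq.toList (some i) (some (i + (word.toList.length : Int))))
            (fun x => x) = PySem.List.sorted word.toList (fun x => x) then (1:Int) else 0)
        ∘ (fun k : Nat => (0 : Int) + (k : Int))) k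
      = (if ((seq.toList.drop k).take word.toList.length).isPerm word.toList then (1:Int) else 0) := by
    intro k
    simp only [Function.comp_apply, zero_add, PySem.List.slice_natCast_add]
    by_cases hp : ((seq.toList.drop k).take word.toList.length).Perm word.toList
    · rw [if_pos ((PySem.List.sorted_id_eq_sorted_id_iff_perm _ _).mpr hp),
        if_pos (List.isPerm_iff.mpr hp)]
    · rw [if_neg (fun hc => hp ((PySem.List.sorted_id_eq_sorted_id_iff_perm _ _).mp hc)),
        if_neg (fun hc => hp (List.isPerm_iff.mp hc))]
  rw [funext hfun, PySem.List.sum_map_ite_one_zero]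
  unfold pvS
  rw [List.range_eq_range']
  have hN : ((seq.toList.length : Int) - (word.toList.length : Int) + 1 - 0).toNat
      = seq.toList.length + 1 - word.toList.length - 0 := by omega
  rw [hN]

-- ===== VERDICT (by name: the statement is the Claim_ definition above) =====
theorem count_similar_spec : Claim_equal_count_similar := by
  intro word seq _
  unfold Spec_count_similar
  by_cases hw : word.toList = []
  · show count_similar word seq = _
    unfold count_similar count_similar_alt
    rw [hw]
    simp only [loopA_empty]
    rfl
  · rw [alt_eq_pvS word seq hw]
    show pvLoopA seq.toList (pvCountA word.toList) (pvZeroA (pvCountA word.toList))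
        (word.toList.length : Int) seq.toList.length 0 0 (pvZeroA (pvCountA word.toList)) 0 0
      = pvS seq.toList word.toList 0
    have hinv : pvInv seq.toList word.toList 0 0 (pvZeroA (pvCountA word.toList)) := by
      refine ⟨le_rfl, Nat.zero_le _, by
        simpa using List.length_pos_iff.mpr hw, ?_, ?_, ?_, ?_⟩
      · intro v
        rw [pvZeroA_contains, pvCountA_contains]
      · intro v
        rw [pvZeroA_getD]
        simp [pvWin]
      · intro v hv
        simp [pvWin] at hv
      · intro v
        simp [pvWin]
    have h := loopA_main seq.toList word.toList hw (seq.toList.length) 0 0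
      (pvZeroA (pvCountA word.toList)) 0 (by omega) hinv
    norm_num at h
    exact h
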